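-- pv_equiv track=rewrite | github.com/RayhanSefat/8PuzzleGame | util.py | numberToState
-- ===== SOURCE A (Python) =====
-- N = 3
--
-- def numberToState(number):
--     result = []
--
--     for i in range(N):
--         currentRow = []
--         for j in range(N):
--             currentRow.append(number % 10)
--             number //= 10
--         currentRow = currentRow[::-1]
--         result.append(currentRow)
--
--     result = result[::-1]
--     return result
-- ===== SOURCE B (Python) =====
-- N = 3
--
-- def numberToState(number):
--     digits = []
--     for _ in range(N * N):
--         digits.append(number % 10)
--         number //= 10
--     digits.reverse()
--     return [digits[i * N:(i + 1) * N] for i in range(N)]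
-- ===== Notes on version B (the rewrite author's own statement) =====
-- stated objective: simpler
-- what changed: Replaces the nested row loop with per-row reversal and a final reversal of the row list by a single flat digit-extraction loop followed by one reversal and reshaping into rows via slicing.
import Mathlib
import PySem

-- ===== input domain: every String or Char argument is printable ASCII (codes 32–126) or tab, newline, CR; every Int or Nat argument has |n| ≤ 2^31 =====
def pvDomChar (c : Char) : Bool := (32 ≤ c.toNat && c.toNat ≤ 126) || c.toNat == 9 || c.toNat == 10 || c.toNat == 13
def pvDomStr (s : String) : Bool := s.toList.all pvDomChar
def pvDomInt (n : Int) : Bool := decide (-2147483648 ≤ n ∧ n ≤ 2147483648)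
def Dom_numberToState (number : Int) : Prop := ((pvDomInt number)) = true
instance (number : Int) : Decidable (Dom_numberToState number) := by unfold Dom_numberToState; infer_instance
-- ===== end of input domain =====

-- B extracts all 9 digits in one flat loop, reverses once and reshapes by slicing; objective: simpler.

-- ===== PORT A =====
def numberToState (number : Int) : List (List Int) :=
  -- result = []; for i in range(N): inner loop builds currentRow, reversed; result.append; result[::-1]
  let st := (PySem.List.pyRange 0 3 1).foldl
    (fun (acc : List (List Int) × Int) _ =>
      let inner := (PySem.List.pyRange 0 3 1).foldl
        (fun (acc2 : List Int × Int) _ =>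
          (acc2.1 ++ [PySem.Int.mod acc2.2 10], PySem.Int.floordiv acc2.2 10))
        ([], acc.2)
      (acc.1 ++ [(PySem.List.slice? inner.1 none none (-1)).getD []], inner.2))
    ([], number)
  (PySem.List.slice? st.1 none none (-1)).getD []

-- ===== PORT B =====
def numberToState_alt (number : Int) : List (List Int) :=
  let st := (PySem.List.pyRange 0 9 1).foldl
    (fun (acc : List Int × Int) _ =>
      (acc.1 ++ [PySem.Int.mod acc.2 10], PySem.Int.floordiv acc.2 10))
    ([], number)
  let digits := st.1.reverse
  (PySem.List.pyRange 0 3 1).map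
    (fun i => PySem.List.slice digits (some (i * 3)) (some ((i + 1) * 3)))

-- ===== PRECONDITION & SPEC =====
def Spec_numberToState (number : Int) (out : List (List Int)) : Prop := out = numberToState_alt number
instance (number : Int) (out : List (List Int)) : Decidable (Spec_numberToState number out) := by unfold Spec_numberToState; infer_instance

-- ===== CLAIM (what is proved, stated in full; the proofs are below) =====
def Claim_equal_numberToState : Prop := ∀ (number : Int), Dom_numberToState number → Spec_numberToState number (numberToState number)

-- ===== LEMMAS AND PROOFS =====

-- ===== VERDICT (by name: the statement is the Claim_ definition above) =====
theorem numberToState_spec : Claim_equal_numberToState := by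
  intro n _
  have h3 : PySem.List.pyRange 0 3 1 = [0, 1, 2] := by decide
  have h9 : PySem.List.pyRange 0 9 1 = [0, 1, 2, 3, 4, 5, 6, 7, 8] := by decide
  unfold Spec_numberToState numberToState numberToState_alt
  rw [h3, h9]
  simp [List.foldl, PySem.List.slice?_none_none_neg_one, PySem.List.slice,
    PySem.List.clampIdx]
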